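-- pv_equiv track=rewrite | github.com/Fondamenti18/fondamenti-di-programmazione | students/1754617/homework04/program01.py | visita_in_ordine
-- ===== SOURCE A (Python) =====
-- def visita_in_ordine(albero,x,tree):
--     if (len(albero[x])!=0):
--         for nodo in albero[x] :
--            visita_in_ordine(albero,nodo,tree)
--         tree[x]=albero[x]
--     else:
--         tree[x]=[]
--     return tree
-- ===== SOURCE B (Python) =====
-- # Iterative re-implementation: explicit stack of (node, expanded) frames instead of
-- # recursion; performs the exact same post-order sequence of writes tree[n] = albero[n]
-- # (same list object for non-leaves, fresh [] for leaves), mutating and returning tree.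
-- def visita_in_ordine(albero, x, tree):
--     stack = [(x, False)]
--     while stack:
--         n, expanded = stack.pop()
--         if expanded:
--             tree[n] = albero[n]
--         else:
--             figli = albero[n]
--             if figli:
--                 stack.append((n, True))
--                 for c in reversed(figli):
--                     stack.append((c, False))
--             else:
--                 tree[n] = []
--     return tree
-- ===== Notes on version B (the rewrite author's own statement) =====
-- stated objective: alternative
-- what changed: Replaces the recursive depth-first visit with an iterative explicit-stack traversal over (node, expanded) frames that performs the same post-order writes; Pre_ excludes exactly the inputs on which A raises (a reachable node missing from albero -> KeyError, or a cycle in the reachable part -> RecursionError).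
import Mathlib
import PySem

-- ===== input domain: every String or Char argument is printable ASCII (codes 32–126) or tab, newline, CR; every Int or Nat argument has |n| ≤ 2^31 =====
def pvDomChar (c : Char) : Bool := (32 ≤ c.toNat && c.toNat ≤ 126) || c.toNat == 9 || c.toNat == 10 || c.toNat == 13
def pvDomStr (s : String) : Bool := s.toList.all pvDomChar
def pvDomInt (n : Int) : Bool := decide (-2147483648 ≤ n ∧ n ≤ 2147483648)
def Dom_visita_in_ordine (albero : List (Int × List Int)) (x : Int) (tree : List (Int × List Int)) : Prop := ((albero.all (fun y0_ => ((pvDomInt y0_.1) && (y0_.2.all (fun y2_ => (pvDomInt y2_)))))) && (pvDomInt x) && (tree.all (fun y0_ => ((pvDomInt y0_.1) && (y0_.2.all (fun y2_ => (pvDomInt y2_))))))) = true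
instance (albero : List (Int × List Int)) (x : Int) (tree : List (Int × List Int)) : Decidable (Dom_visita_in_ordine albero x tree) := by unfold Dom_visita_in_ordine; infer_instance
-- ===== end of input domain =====

-- B replaces A's recursion by an iterative explicit-stack traversal (alternative decomposition,
-- same cost); both mutate the tree dict in place in Python — the equivalence proved here is
-- about the returned dict value.

-- ===== PORT A =====
-- A is unboundedly recursive, so it is ported with a fuel (recursion-depth) parameter;
-- under Pre_ the recursion depth is bounded by the number of keys, so fuel albero.length+1 suffices.
mutual
def pvVisitA (albero : List (Int × List Int)) : Nat → Int → PySem.Dict Int (List Int) → Option (PySem.Dict Int (List Int))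
  | 0, _, _ => none
  | Nat.succ f, x, tree =>
    match PySem.Dict.get? (PySem.Dict.mk albero) x with
    | none => none            -- KeyError: albero[x]
    | some ch =>
      if ch.length ≠ 0 then
        match pvVisitListA albero f ch tree with
        | none => none
        | some t => some (PySem.Dict.insert t x ch)    -- tree[x] = albero[x]
      else some (PySem.Dict.insert tree x ([] : List Int))   -- tree[x] = []
  termination_by f _ _ => (f, 0)
def pvVisitListA (albero : List (Int × List Int)) : Nat → List Int → PySem.Dict Int (List Int) → Option (PySem.Dict Int (List Int))
  | _, [], tree => some tree
  | f, c :: cs, tree =>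
    match pvVisitA albero f c tree with
    | none => none
    | some t => pvVisitListA albero f cs t
  termination_by f cs _ => (f, cs.length + 1)
end

def pvFuelA (albero : List (Int × List Int)) : Nat := albero.length + 1

def visita_in_ordine (albero : List (Int × List Int)) (x : Int) (tree : List (Int × List Int)) : List (Int × List Int) :=
  ((pvVisitA albero (pvFuelA albero) x (PySem.Dict.mk tree)).getD (PySem.Dict.mk tree)).items

-- ===== PORT B =====
-- The Python stack holds (node, expanded) pairs, top last; here the stack is a list with the
-- top at the head, so pushing the reversed children and popping them equals prepending the
-- children in order.  One fuel unit per popped frame.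
inductive PvFrame : Type
  | enter : Int → PvFrame    -- (n, False)
  | exit : Int → PvFrame     -- (n, True)
deriving DecidableEq, Repr

def pvRunB (albero : List (Int × List Int)) : Nat → List PvFrame → PySem.Dict Int (List Int) → Option (PySem.Dict Int (List Int))
  | _, [], tree => some tree
  | 0, _ :: _, _ => none
  | Nat.succ f, PvFrame.enter n :: rest, tree =>
    match PySem.Dict.get? (PySem.Dict.mk albero) n with
    | none => none            -- KeyError: albero[n]
    | some ch =>
      if ch.length ≠ 0 then
        pvRunB albero f (ch.map PvFrame.enter ++ PvFrame.exit n :: rest) tree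
      else pvRunB albero f rest (PySem.Dict.insert tree n ([] : List Int))
  | Nat.succ f, PvFrame.exit n :: rest, tree =>
    match PySem.Dict.get? (PySem.Dict.mk albero) n with
    | none => none
    | some ch => pvRunB albero f rest (PySem.Dict.insert tree n ch)   -- tree[n] = albero[n]

def pvKidTotal (albero : List (Int × List Int)) : Nat :=
  albero.foldl (fun a p => a + p.2.length) 0

def pvCost (w : Nat) : Nat → Nat
  | 0 => 0
  | Nat.succ f => 2 + w * pvCost w f

def pvFuelB (albero : List (Int × List Int)) : Nat := pvCost (pvKidTotal albero) (pvFuelA albero)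

def visita_in_ordine_alt (albero : List (Int × List Int)) (x : Int) (tree : List (Int × List Int)) : List (Int × List Int) :=
  ((pvRunB albero (pvFuelB albero) [PvFrame.enter x] (PySem.Dict.mk tree)).getD (PySem.Dict.mk tree)).items

-- ===== PRECONDITION & SPEC =====
def pvKids (albero : List (Int × List Int)) (n : Int) : List Int :=
  (PySem.Dict.get? (PySem.Dict.mk albero) n).getD []
-- one breadth-first step: (visited, frontier) -> (visited ++ new nodes, new nodes)
def pvGrow (albero : List (Int × List Int)) (st : List Int × List Int) : List Int × List Int :=
  let new := PySem.Set.ofList ((st.2.flatMap (pvKids albero)).filter (fun c => !(st.1.contains c)))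
  (st.1 ++ new, new)
-- all nodes within distance albero.length+1 of x (= all reachable nodes when they are keys)
def pvReach (albero : List (Int × List Int)) (x : Int) : List Int :=
  ((pvGrow albero)^[albero.length.succ] ([x], [x])).1
-- leaf-peeling: pvGrounded R k = the nodes of R all of whose descendant chains end within k steps
def pvGrounded (albero : List (Int × List Int)) (R : List Int) : Nat → List Int
  | Nat.zero => []
  | Nat.succ k =>
    let g := pvGrounded albero R k
    R.filter (fun n => (pvKids albero n).all (fun c => g.contains c))

-- Pre_ excludes exactly the inputs on which the Python A raises: a node reachable from x
-- that is missing from albero (KeyError), or a cycle in the part reachable from x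
-- (unbounded recursion, RecursionError); A returns normally on every other input.
def Pre_visita_in_ordine (albero : List (Int × List Int)) (x : Int) (tree : List (Int × List Int)) : Prop :=
  ∀ n ∈ pvReach albero x,
    (PySem.Dict.get? (PySem.Dict.mk albero) n).isSome = true ∧
    n ∈ pvGrounded albero (pvReach albero x) albero.length

instance (albero : List (Int × List Int)) (x : Int) (tree : List (Int × List Int)) : Decidable (Pre_visita_in_ordine albero x tree) := by
  unfold Pre_visita_in_ordine; infer_instance

def pvWitness_visita_in_ordine : (List (Int × List Int)) × Int × (List (Int × List Int)) :=
  ([(101, [102, 103]), (102, [103]), (103, [])], 101, [])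

def Spec_visita_in_ordine (albero : List (Int × List Int)) (x : Int) (tree : List (Int × List Int)) (out : List (Int × List Int)) : Prop := out = visita_in_ordine_alt albero x tree
instance (albero : List (Int × List Int)) (x : Int) (tree : List (Int × List Int)) (out : List (Int × List Int)) : Decidable (Spec_visita_in_ordine albero x tree out) := by unfold Spec_visita_in_ordine; infer_instance

-- ===== CLAIM (what is proved, stated in full; the proofs are below) =====
def Claim_equal_visita_in_ordine : Prop := ∀ (albero : List (Int × List Int)) (x : Int) (tree : List (Int × List Int)), Dom_visita_in_ordine albero x tree → Pre_visita_in_ordine albero x tree → Spec_visita_in_ordine albero x tree (visita_in_ordine albero x tree)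

-- ===== LEMMAS AND PROOFS =====

theorem pvMono (albero : List (Int × List Int)) :
    ∀ f : Nat,
      (∀ n t r, pvVisitA albero f n t = some r → pvVisitA albero (f+1) n t = some r) ∧
      (∀ cs t r, pvVisitListA albero f cs t = some r → pvVisitListA albero (f+1) cs t = some r) := by
  intro f
  induction f with
  | zero =>
    constructor
    · intro n t r h; simp [pvVisitA] at h
    · intro cs t r h
      cases cs with
      | nil => simpa [pvVisitListA] using h
      | cons c cs => simp [pvVisitListA, pvVisitA] at h
  | succ f ih =>
    have hA : ∀ n t r, pvVisitA albero (f+1) n t = some r →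
        pvVisitA albero (f+1+1) n t = some r := by
      intro n t r h
      simp only [pvVisitA] at h ⊢
      cases hg : PySem.Dict.get? (PySem.Dict.mk albero) n with
      | none => simp [hg] at h
      | some ch =>
        simp only [hg] at h ⊢
        by_cases hch : ch.length ≠ 0
        · simp only [if_pos hch] at h ⊢
          cases hl : pvVisitListA albero f ch t with
          | none => simp [hl] at h
          | some t1 =>
            simp only [hl] at h
            rw [ih.2 _ _ _ hl]
            exact h
        · simp only [if_neg hch] at h ⊢; exact h
    constructor
    · exact hA
    · intro cs
      induction cs with
      | nil => intro t r h; simpa [pvVisitListA] using h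
      | cons c cs ihc =>
        intro t r h
        simp only [pvVisitListA] at h ⊢
        cases ha : pvVisitA albero (f+1) c t with
        | none => simp [ha] at h
        | some t1 =>
          simp only [ha] at h
          rw [hA _ _ _ ha]
          exact ihc _ _ h

theorem pvVisitA_mono_le (albero : List (Int × List Int)) {f g : Nat} (hfg : f ≤ g) :
    ∀ {n t r}, pvVisitA albero f n t = some r → pvVisitA albero g n t = some r := by
  induction hfg with
  | refl => intro n t r h; exact h
  | step _ ih => intro n t r h; exact (pvMono albero _).1 _ _ _ (ih h)

theorem pvRunB_mono (albero : List (Int × List Int)) :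
    ∀ f s t r, pvRunB albero f s t = some r → pvRunB albero (f+1) s t = some r := by
  intro f
  induction f with
  | zero =>
    intro s t r h
    cases s with
    | nil => simpa [pvRunB] using h
    | cons fr rest => simp [pvRunB] at h
  | succ f ih =>
    intro s t r h
    cases s with
    | nil => simpa [pvRunB] using h
    | cons fr rest =>
      cases fr with
      | enter n =>
        simp only [pvRunB] at h ⊢
        cases hg : PySem.Dict.get? (PySem.Dict.mk albero) n with
        | none => simp [hg] at h
        | some ch =>
          simp only [hg] at h ⊢
          by_cases hch : ch.length ≠ 0
          · simp only [if_pos hch] at h ⊢; exact ih _ _ _ h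
          · simp only [if_neg hch] at h ⊢; exact ih _ _ _ h
      | exit n =>
        simp only [pvRunB] at h ⊢
        cases hg : PySem.Dict.get? (PySem.Dict.mk albero) n with
        | none => simp [hg] at h
        | some ch =>
          simp only [hg] at h ⊢
          exact ih _ _ _ h

theorem pvRunB_mono_le (albero : List (Int × List Int)) {f g : Nat} (hfg : f ≤ g) :
    ∀ {s t r}, pvRunB albero f s t = some r → pvRunB albero g s t = some r := by
  induction hfg with
  | refl => intro s t r h; exact h
  | step _ ih => intro s t r h; exact pvRunB_mono albero _ _ _ _ (ih h)

theorem pvKT_aux (l : List (Int × List Int)) :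
    ∀ a : Nat, l.foldl (fun a p => a + p.2.length) a = a + l.foldl (fun a p => a + p.2.length) 0 := by
  induction l with
  | nil => intro a; simp
  | cons p l ih =>
    intro a
    simp only [List.foldl_cons]
    rw [ih (a + p.2.length), ih (0 + p.2.length)]
    omega

theorem pvKid_le (albero : List (Int × List Int)) :
    ∀ {n ch}, PySem.Dict.get? (PySem.Dict.mk albero) n = some ch → ch.length ≤ pvKidTotal albero := by
  induction albero with
  | nil => intro n ch h; simp [PySem.Dict.get?] at h
  | cons p l ih =>
    intro n ch h
    rw [show (p :: l) = ((p.1, p.2) :: l) by simp] at h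
    rw [PySem.Dict.get?_mk_cons] at h
    have hKT : pvKidTotal (p :: l) = p.2.length + pvKidTotal l := by
      simp only [pvKidTotal, List.foldl_cons]
      rw [pvKT_aux l (0 + p.2.length)]
      omega
    by_cases hk : p.1 == n
    · rw [if_pos hk] at h
      cases h
      omega
    · rw [if_neg hk] at h
      have := ih h
      omega

theorem pvSim (albero : List (Int × List Int)) :
    ∀ f : Nat,
      (∀ n t t', pvVisitA albero f n t = some t' →
        ∀ rest g r, pvRunB albero g rest t' = some r →
          pvRunB albero (g + pvCost (pvKidTotal albero) f) (PvFrame.enter n :: rest) t = some r) ∧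
      (∀ cs t t', pvVisitListA albero f cs t = some t' →
        ∀ rest g r, pvRunB albero g rest t' = some r →
          pvRunB albero (g + cs.length * pvCost (pvKidTotal albero) f) (cs.map PvFrame.enter ++ rest) t = some r) := by
  intro f
  induction f with
  | zero =>
    constructor
    · intro n t t' h; simp [pvVisitA] at h
    · intro cs t t' h rest g r hrun
      cases cs with
      | nil =>
        simp only [pvVisitListA, Option.some.injEq] at h
        subst h
        simpa using hrun
      | cons c cs => simp [pvVisitListA, pvVisitA] at h
  | succ f ih =>
    have hA : ∀ n t t', pvVisitA albero (f+1) n t = some t' →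
        ∀ rest g r, pvRunB albero g rest t' = some r →
          pvRunB albero (g + pvCost (pvKidTotal albero) (f+1)) (PvFrame.enter n :: rest) t = some r := by
      intro n t t' h rest g r hrun
      simp only [pvVisitA] at h
      cases hg : PySem.Dict.get? (PySem.Dict.mk albero) n with
      | none => simp [hg] at h
      | some ch =>
        simp only [hg] at h
        have hfuel : g + pvCost (pvKidTotal albero) (f+1)
            = (g + 1 + pvKidTotal albero * pvCost (pvKidTotal albero) f) + 1 := by
          simp only [pvCost]; ring
        rw [hfuel]
        by_cases hch : ch.length ≠ 0
        · simp only [if_pos hch] at h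
          cases hl : pvVisitListA albero f ch t with
          | none => simp [hl] at h
          | some t1 =>
            simp only [hl, Option.some.injEq] at h
            subst h
            simp only [pvRunB, hg, if_pos hch]
            have hlen : ch.length ≤ pvKidTotal albero := pvKid_le albero hg
            have hexit : pvRunB albero
                (g + (pvKidTotal albero - ch.length) * pvCost (pvKidTotal albero) f + 1)
                (PvFrame.exit n :: rest) t1 = some r := by
              simp only [pvRunB, hg]
              exact pvRunB_mono_le albero (Nat.le_add_right _ _) hrun
            have := ih.2 ch t t1 hl (PvFrame.exit n :: rest)
              (g + (pvKidTotal albero - ch.length) * pvCost (pvKidTotal albero) f + 1) r hexit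
            have harith : g + (pvKidTotal albero - ch.length) * pvCost (pvKidTotal albero) f + 1
                + ch.length * pvCost (pvKidTotal albero) f
                = g + 1 + pvKidTotal albero * pvCost (pvKidTotal albero) f := by
              have h1 : (pvKidTotal albero - ch.length) * pvCost (pvKidTotal albero) f
                  + ch.length * pvCost (pvKidTotal albero) f
                  = pvKidTotal albero * pvCost (pvKidTotal albero) f := by
                rw [← Nat.add_mul, Nat.sub_add_cancel hlen]
              calc g + (pvKidTotal albero - ch.length) * pvCost (pvKidTotal albero) f + 1
                  + ch.length * pvCost (pvKidTotal albero) f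
                  = g + 1 + ((pvKidTotal albero - ch.length) * pvCost (pvKidTotal albero) f
                    + ch.length * pvCost (pvKidTotal albero) f) := by ring
                _ = g + 1 + pvKidTotal albero * pvCost (pvKidTotal albero) f := by rw [h1]
            rw [harith] at this
            exact this
        · simp only [if_neg hch, Option.some.injEq] at h
          subst h
          simp only [pvRunB, hg, if_neg hch]
          exact pvRunB_mono_le albero ((Nat.le_add_right g 1).trans (Nat.le_add_right (g+1) _)) hrun
    refine ⟨hA, ?_⟩
    intro cs
    induction cs with
    | nil =>
      intro t t' h rest g r hrun
      simp only [pvVisitListA, Option.some.injEq] at h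
      subst h
      simpa using hrun
    | cons c cs ihc =>
      intro t t' h rest g r hrun
      simp only [pvVisitListA] at h
      cases ha : pvVisitA albero (f+1) c t with
      | none => simp [ha] at h
      | some t1 =>
        simp only [ha] at h
        have htail := ihc t1 t' h rest g r hrun
        have := hA c t t1 ha (cs.map PvFrame.enter ++ rest)
          (g + cs.length * pvCost (pvKidTotal albero) (f+1)) r htail
        have harith : g + cs.length * pvCost (pvKidTotal albero) (f+1)
            + pvCost (pvKidTotal albero) (f+1)
            = g + (c :: cs).length * pvCost (pvKidTotal albero) (f+1) := by
          simp only [List.length_cons]; ring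
        rw [harith] at this
        simpa using this

-- the visited component only grows, so x ∈ pvReach albero x
theorem pvGrow_mem (albero : List (Int × List Int)) :
    ∀ k : Nat, ∀ st : List Int × List Int, ∀ y ∈ st.1, y ∈ ((pvGrow albero)^[k] st).1 := by
  intro k
  induction k with
  | zero => intro st y hy; simpa using hy
  | succ k ih =>
    intro st y hy
    rw [Function.iterate_succ_apply]
    exact ih _ y (List.mem_append_left _ hy)

theorem pvSelf_mem_reach (albero : List (Int × List Int)) (x : Int) :
    x ∈ pvReach albero x := pvGrow_mem albero _ ([x], [x]) x (by simp)

-- ===== the termination argument under Pre_ =====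
-- a node grounded at level k is visited successfully by A with fuel k
theorem pvSucceeds (albero : List (Int × List Int)) (R : List Int)
    (hkeys : ∀ n ∈ R, (PySem.Dict.get? (PySem.Dict.mk albero) n).isSome = true) :
    ∀ k : Nat, ∀ n, n ∈ pvGrounded albero R k →
      ∀ t, ∃ r, pvVisitA albero k n t = some r := by
  intro k
  induction k with
  | zero => intro n hn t; simp [pvGrounded] at hn
  | succ k ih =>
    intro n hn t
    simp only [pvGrounded, List.mem_filter] at hn
    obtain ⟨hnR, hkid⟩ := hn
    rw [List.all_eq_true] at hkid
    have hsome := hkeys n hnR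
    cases hg : PySem.Dict.get? (PySem.Dict.mk albero) n with
    | none => rw [hg] at hsome; simp at hsome
    | some ch =>
      have hkids : pvKids albero n = ch := by simp [pvKids, hg]
      have hchild : ∀ c ∈ ch, ∀ t', ∃ r, pvVisitA albero k c t' = some r := by
        intro c hcch t'
        have hcg := hkid c (hkids ▸ hcch)
        rw [List.contains_iff_mem] at hcg
        exact ih c hcg t'
      have hlist : ∀ cs, (∀ c ∈ cs, ∀ t', ∃ r, pvVisitA albero k c t' = some r) →
          ∀ t', ∃ r, pvVisitListA albero k cs t' = some r := by
        intro cs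
        induction cs with
        | nil => intro _ t'; exact ⟨t', by simp [pvVisitListA]⟩
        | cons c cs ihc =>
          intro hall t'
          obtain ⟨r1, hr1⟩ := hall c (by simp) t'
          obtain ⟨r2, hr2⟩ := ihc (fun c' hc' => hall c' (by simp [hc'])) r1
          exact ⟨r2, by simp only [pvVisitListA, hr1]; exact hr2⟩
      by_cases hch : ch.length ≠ 0
      · obtain ⟨r, hr⟩ := hlist ch hchild t
        exact ⟨PySem.Dict.insert r n ch, by simp only [pvVisitA, hg, if_pos hch, hr]⟩
      · exact ⟨PySem.Dict.insert t n [], by simp only [pvVisitA, hg, if_neg hch]⟩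

-- ===== VERDICT (by name: the statement is the Claim_ definition above) =====
theorem visita_in_ordine_spec : Claim_equal_visita_in_ordine := by
  intro albero x tree _hdom hpre
  obtain ⟨_, hx⟩ := hpre x (pvSelf_mem_reach albero x)
  obtain ⟨r, hr⟩ := pvSucceeds albero (pvReach albero x)
    (fun n hn => (hpre n hn).1) albero.length x hx (PySem.Dict.mk tree)
  have hA : pvVisitA albero (pvFuelA albero) x (PySem.Dict.mk tree) = some r :=
    pvVisitA_mono_le albero (by simp [pvFuelA]) hr
  have hB : pvRunB albero (pvFuelB albero) [PvFrame.enter x] (PySem.Dict.mk tree) = some r := by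
    have h0 : pvRunB albero 0 [] r = some r := by simp [pvRunB]
    have := (pvSim albero (pvFuelA albero)).1 x (PySem.Dict.mk tree) r hA [] 0 r h0
    simpa [pvFuelB] using this
  unfold Spec_visita_in_ordine visita_in_ordine visita_in_ordine_alt
  rw [hA, hB]
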